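-- pv_equiv track=rewrite | github.com/Jack-Hall/mini_maker | backend/preprocess_data.py | get_horizontal_words
-- ===== SOURCE A (Python) =====
-- def get_horizontal_words(grid):
--     # given a grid of underscores and hashtags. find all horizontal words
--     # a word is a row of uninterupted underscored.
--     # a word can contain no hastags or subwords.
--     words = []
--     row_index = 0
--     for row in grid:
--         i = 0
--         while i < len(row):
--             char = row[i]
--             while i < len(row) and char == "#":
--                 i +=1
--                 if i == len(row):
--                     break
--                 char = row[i]
--             word_start = i
--             while i < len(row) and char != "#":
--                 char = row[i]
--                 i += 1
--             #add the word.
--             if(i <= len(row) and char == '#'):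
--                 word_end = i-2
--             else:
--                 word_end = i-1
--             if word_end - word_start < 1:
--                 continue
--             words.append(((row_index, word_start), (row_index, word_end)))
--         row_index += 1
--     return words
-- ===== SOURCE B (Python) =====
-- def get_horizontal_words(grid):
--     # Boundary-pairing: collect the '#' positions of each row, add sentinel
--     # boundaries -1 and len(row), and pair up consecutive boundaries; each gap
--     # of width >= 2 between two boundaries is a word.
--     words = []
--     for r, row in enumerate(grid):
--         bounds = [-1] + [i for i, c in enumerate(row) if c == "#"] + [len(row)]
--         for p, q in zip(bounds, bounds[1:]):
--             if q - p >= 3: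
--                 words.append(((r, p + 1), (r, q - 1)))
--     return words
-- ===== Notes on version B (the rewrite author's own statement) =====
-- stated objective: alternative
-- what changed: Replaced A's hand-rolled index/char state machine (nested while loops with a carried 'char' variable and an i-2/i-1 end correction) by a staged boundary-pairing pass: per row collect all '#' positions plus sentinel boundaries -1 and len(row), then zip consecutive boundaries and emit each gap of width >= 2 as a word.
import Mathlib
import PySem

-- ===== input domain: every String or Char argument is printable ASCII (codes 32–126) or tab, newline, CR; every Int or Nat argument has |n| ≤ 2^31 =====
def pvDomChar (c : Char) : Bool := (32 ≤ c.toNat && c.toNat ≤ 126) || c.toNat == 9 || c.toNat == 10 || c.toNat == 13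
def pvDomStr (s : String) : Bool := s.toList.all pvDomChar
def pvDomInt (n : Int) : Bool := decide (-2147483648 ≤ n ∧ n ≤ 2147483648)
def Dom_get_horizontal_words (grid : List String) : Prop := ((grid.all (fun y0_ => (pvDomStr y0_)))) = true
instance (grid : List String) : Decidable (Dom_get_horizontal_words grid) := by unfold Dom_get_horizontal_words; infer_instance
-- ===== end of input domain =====

-- B replaces A's hand-rolled index/char state machine by a staged boundary-pairing pass:
-- per row it collects the '#' positions plus sentinels -1 and len(row), then pairs up
-- consecutive boundaries and emits each gap of width >= 2 (objective: alternative).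

-- ===== PORT A =====
-- inner `while i < len(row) and char == "#"` loop (with its early `break`); the fuel argument
-- only bounds the iteration count (the loop advances i, so cs.length steps always suffice)
def aSkip (cs : List Char) : Nat → Nat → Char → Nat × Char
  | 0, i, c => (i, c)
  | fuel + 1, i, c =>
    if i < cs.length ∧ c = '#' then
      (if i + 1 = cs.length then (i + 1, c)
       else aSkip cs fuel (i + 1) (cs.getD (i + 1) ' '))
    else (i, c)

-- inner `while i < len(row) and char != "#"` loop (fuel as above)
def aScan (cs : List Char) : Nat → Nat → Char → Nat × Char
  | 0, i, c => (i, c)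
  | fuel + 1, i, c =>
    if i < cs.length ∧ c ≠ '#' then aScan cs fuel (i + 1) (cs.getD i ' ') else (i, c)

-- the `while i < len(row):` loop of A (one row), with the running `words` accumulator
def aRow (cs : List Char) : Nat → Nat → Int → List ((Int × Int) × (Int × Int)) →
    List ((Int × Int) × (Int × Int))
  | 0, _, _, acc => acc
  | fuel + 1, i, r, acc =>
    if i < cs.length then
      let c := cs.getD i ' '
      let p := aSkip cs cs.length i c
      let q := aScan cs (cs.length + 1) p.1 p.2
      let wend : Int := if q.1 ≤ cs.length ∧ q.2 = '#' then (q.1 : Int) - 2 else (q.1 : Int) - 1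
      let acc' := if wend - (p.1 : Int) < 1 then acc
                  else acc ++ [((r, (p.1 : Int)), (r, wend))]
      aRow cs fuel q.1 r acc'
    else acc

-- `for row in grid:` with the incrementing row_index
def aRows (grid : List String) (r : Int) (acc : List ((Int × Int) × (Int × Int))) :
    List ((Int × Int) × (Int × Int)) :=
  match grid with
  | [] => acc
  | row :: rest => aRows rest (r + 1) (aRow row.toList (row.toList.length + 1) 0 r acc)

def get_horizontal_words (grid : List String) : List ((Int × Int) × (Int × Int)) :=
  aRows grid 0 []

-- ===== PORT B =====
-- `for r, row in enumerate(grid):` then per row: `bounds = [-1] + [i for i, c in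
-- enumerate(row) if c == "#"] + [len(row)]` and `for p, q in zip(bounds, bounds[1:]):`
def get_horizontal_words_alt (grid : List String) : List ((Int × Int) × (Int × Int)) :=
  (PySem.List.enumerate grid 0).foldl (fun words rp =>
    let row := rp.2.toList
    let bounds : List Int :=
      [-1] ++ ((PySem.List.enumerate row 0).filter (fun p => p.2 == '#')).map (fun p => p.1)
        ++ [(row.length : Int)]
    (bounds.zip (bounds.drop 1)).foldl
      (fun words pq =>
        if 3 ≤ pq.2 - pq.1 then words ++ [((rp.1, pq.1 + 1), (rp.1, pq.2 - 1))] else words)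
      words) []

-- ===== PRECONDITION & SPEC =====
def Spec_get_horizontal_words (grid : List String) (out : List ((Int × Int) × (Int × Int))) : Prop := out = get_horizontal_words_alt grid
instance (grid : List String) (out : List ((Int × Int) × (Int × Int))) : Decidable (Spec_get_horizontal_words grid out) := by unfold Spec_get_horizontal_words; infer_instance

-- ===== CLAIM (what is proved, stated in full; the proofs are below) =====
def Claim_equal_get_horizontal_words : Prop := ∀ (grid : List String), Dom_get_horizontal_words grid → Spec_get_horizontal_words grid (get_horizontal_words grid)

-- ===== LEMMAS AND PROOFS =====

-- proof-side copies of A's loops by well-founded recursion (no fuel), used to organise the proof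
def aSkipW (cs : List Char) (i : Nat) (c : Char) : Nat × Char :=
  if h : i < cs.length ∧ c = '#' then
    if i + 1 = cs.length then (i + 1, c)
    else aSkipW cs (i + 1) (cs.getD (i + 1) ' ')
  else (i, c)
termination_by cs.length - i

def aScanW (cs : List Char) (i : Nat) (c : Char) : Nat × Char :=
  if h : i < cs.length ∧ c ≠ '#' then aScanW cs (i + 1) (cs.getD i ' ')
  else (i, c)
termination_by cs.length - i

theorem aSkip_fst_ge (cs : List Char) (i : Nat) (c : Char) : i ≤ (aSkipW cs i c).1 := by
  fun_induction aSkipW <;> simp_all <;> omega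

theorem aScan_fst_ge (cs : List Char) (i : Nat) (c : Char) : i ≤ (aScanW cs i c).1 := by
  fun_induction aScanW <;> simp_all <;> omega

theorem aSkip_of_ne (cs : List Char) (i : Nat) (c : Char) (hc : c ≠ '#') :
    aSkipW cs i c = (i, c) := by
  rw [aSkipW]; simp [hc]

theorem aSkip_fst_pos (cs : List Char) (i : Nat) (c : Char) (h : i < cs.length) (hc : c = '#') :
    i + 1 ≤ (aSkipW cs i c).1 := by
  rw [aSkipW]
  simp only [h, hc, and_true, true_and, if_pos, dif_pos]
  split
  · simp
  · exact aSkip_fst_ge cs (i + 1) _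

theorem aScan_fst_pos (cs : List Char) (i : Nat) (c : Char) (h : i < cs.length) (hc : c ≠ '#') :
    i + 1 ≤ (aScanW cs i c).1 := by
  rw [aScanW]
  simp only [h, hc, ne_eq, not_false_eq_true, and_true, true_and, dif_pos]
  exact aScan_fst_ge cs (i + 1) _

-- the `while i < len(row):` loop body of A (one row), with the running `words` accumulator
def aRowW (cs : List Char) (i : Nat) (r : Int) (acc : List ((Int × Int) × (Int × Int))) :
    List ((Int × Int) × (Int × Int)) :=
  if h : i < cs.length then
    let c := cs.getD i ' '
    let p := aSkipW cs i c
    let start := p.1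
    let q := aScanW cs p.1 p.2
    let wend : Int := if q.1 ≤ cs.length ∧ q.2 = '#' then (q.1 : Int) - 2 else (q.1 : Int) - 1
    let acc' := if wend - (start : Int) < 1 then acc
                else acc ++ [((r, (start : Int)), (r, wend))]
    aRowW cs q.1 r acc'
  else acc
termination_by cs.length - i
decreasing_by
  by_cases hc : cs.getD i ' ' = '#'
  · have h1 := aSkip_fst_pos cs i (cs.getD i ' ') h hc
    have h2 := aScan_fst_ge cs (aSkipW cs i (cs.getD i ' ')).1 (aSkipW cs i (cs.getD i ' ')).2
    simp only [p, q, c, start] at *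
    omega
  · have h1 : aSkipW cs i (cs.getD i ' ') = (i, cs.getD i ' ') := aSkip_of_ne cs i _ hc
    have h2 : i + 1 ≤ (aScanW cs i (cs.getD i ' ')).1 := aScan_fst_pos cs i _ h hc
    simp only [p, q, c, start, h1] at *
    omega

-- proof-side run decomposition: length of the maximal leading run with key (ch == '#') = b
def takeRun (b : Bool) : List Char → Nat × List Char
  | [] => (0, [])
  | c :: t =>
    if (c == '#') = b then
      let p := takeRun b t
      (p.1 + 1, p.2)
    else (0, c :: t)

theorem takeRun_len (b : Bool) (l : List Char) :
    (takeRun b l).1 + (takeRun b l).2.length = l.length := by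
  induction l with
  | nil => simp [takeRun]
  | cons c t ih => by_cases h : (c == '#') = b <;> simp [takeRun, h] <;> omega

-- runs of one row, tracking the start index i (intermediate between A's walk and B's bounds)
def bRowW (r : Int) (i : Nat) (cs : List Char) : List ((Int × Int) × (Int × Int)) :=
  match hcs : cs with
  | [] => []
  | c :: t =>
    let b := c == '#'
    let p := takeRun b cs
    (if b = false ∧ 2 ≤ p.1 then [((r, (i : Int)), (r, (i : Int) + p.1 - 1))] else []) ++
      bRowW r (i + p.1) p.2
termination_by cs.length
decreasing_by
  subst hcs
  have hlen := takeRun_len (c == '#') t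
  simp [takeRun]
  omega

theorem takeRun_snd_drop (b : Bool) (l : List Char) :
    (takeRun b l).2 = l.drop (takeRun b l).1 := by
  induction l with
  | nil => simp [takeRun]
  | cons c t ih =>
    by_cases h : (c == '#') = b <;> simp [takeRun, h, ih]

theorem takeRun_snd_head (b : Bool) (l : List Char) (c : Char) (t : List Char)
    (h : (takeRun b l).2 = c :: t) : (c == '#') = !b := by
  induction l with
  | nil => simp [takeRun] at h
  | cons c' t' ih =>
    by_cases h' : (c' == '#') = b
    · simp [takeRun, h'] at h; exact ih h
    · simp [takeRun, h'] at h
      obtain ⟨rfl, rfl⟩ := h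
      cases b <;> simp_all

theorem bRow_nil (r : Int) (i : Nat) : bRowW r i [] = [] := by rw [bRowW]

theorem bRow_cons (r : Int) (i : Nat) (c : Char) (t : List Char) :
    bRowW r i (c :: t) =
      (if (c == '#') = false ∧ 2 ≤ (takeRun (c == '#') (c :: t)).1 then
        [((r, (i : Int)), (r, (i : Int) + (takeRun (c == '#') (c :: t)).1 - 1))] else []) ++
      bRowW r (i + (takeRun (c == '#') (c :: t)).1) (takeRun (c == '#') (c :: t)).2 := by
  rw [bRowW]

theorem takeRun_true_hash (t : List Char) :
    takeRun true ('#' :: t) = ((takeRun true t).1 + 1, (takeRun true t).2) := by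
  simp [takeRun]

theorem bRow_cons_hash (r : Int) (i : Nat) (t : List Char) :
    bRowW r i ('#' :: t) = bRowW r (i + 1) t := by
  rw [bRow_cons]
  simp only [beq_self_eq_true, Bool.true_eq_false, false_and, ite_false, takeRun_true_hash,
    List.nil_append]
  cases t with
  | nil => simp [takeRun, bRow_nil]
  | cons c t' =>
    by_cases h : c = '#'
    · subst h
      rw [bRow_cons]
      simp only [beq_self_eq_true, Bool.true_eq_false, false_and, ite_false, List.nil_append]
      have harith : i + ((takeRun true ('#' :: t')).1 + 1) =
          i + 1 + (takeRun ('#' == '#') ('#' :: t')).1 := by simp only [beq_self_eq_true]; omega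
      rw [harith]
      simp
    · have : takeRun true (c :: t') = (0, c :: t') := by simp [takeRun, h]
      rw [this]

theorem bRow_skipHash (r : Int) (l : List Char) :
    ∀ i, bRowW r i l = bRowW r (i + (takeRun true l).1) (takeRun true l).2 := by
  induction l with
  | nil => intro i; simp [takeRun]
  | cons c t ih =>
    intro i
    by_cases h : c = '#'
    · subst h
      rw [bRow_cons_hash, takeRun_true_hash, ih (i + 1)]
      have : i + 1 + (takeRun true t).1 = i + ((takeRun true t).1 + 1) := by omega
      rw [this]
    · have : takeRun true (c :: t) = (0, c :: t) := by simp [takeRun, h]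
      rw [this]
      simp

theorem aSkip_eq (cs : List Char) :
    ∀ n i, i < cs.length → cs.length - i ≤ n →
      aSkipW cs i (cs.getD i ' ') =
        (i + (takeRun true (cs.drop i)).1, (takeRun true (cs.drop i)).2.headD '#') := by
  intro n
  induction n with
  | zero => intro i h hle; omega
  | succ n ih =>
    intro i h hle
    have hget : cs.getD i ' ' = cs[i] := List.getD_eq_getElem cs ' ' h
    have hdrop : cs.drop i = cs[i] :: cs.drop (i + 1) := List.drop_eq_getElem_cons h
    by_cases hc : cs[i] = '#'
    · rw [aSkipW]
      simp only [hget, hc, and_true, dif_pos h]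
      have htk : takeRun true (cs.drop i) =
          ((takeRun true (cs.drop (i + 1))).1 + 1, (takeRun true (cs.drop (i + 1))).2) := by
        rw [hdrop, hc]; simp [takeRun]
      by_cases hend : i + 1 = cs.length
      · have : cs.drop (i + 1) = [] := by rw [List.drop_eq_nil_iff]; omega
        rw [if_pos hend, htk, this]
        simp [takeRun, hc]
      · rw [if_neg hend]
        have h1 : i + 1 < cs.length := by omega
        have := ih (i + 1) h1 (by omega)
        rw [this, htk]
        simp; omega
    · rw [aSkip_of_ne cs i _ (by rw [hget]; exact hc)]
      have : takeRun true (cs.drop i) = (0, cs.drop i) := by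
        rw [hdrop]; simp [takeRun, hc]
      rw [this, hget, hdrop]
      simp [List.getElem?_eq_getElem h]

theorem aScan_eq (cs : List Char) :
    ∀ n i c, cs.length - i ≤ n → i ≤ cs.length → c ≠ '#' →
      ∃ c2, aScanW cs i c =
          (i + (takeRun false (cs.drop i)).1 +
            (if (takeRun false (cs.drop i)).2 = [] then 0 else 1), c2) ∧
        (c2 = '#' ↔ (takeRun false (cs.drop i)).2 ≠ []) := by
  intro n
  induction n with
  | zero =>
    intro i c hle hi hc
    have : i = cs.length := by omega
    subst this
    have hdrop : cs.drop cs.length = [] := by simp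
    refine ⟨c, ?_, ?_⟩
    · rw [aScanW]
      simp [hdrop, takeRun]
    · simp [hdrop, takeRun, hc]
  | succ n ih =>
    intro i c hle hi hc
    by_cases h : i < cs.length
    · have hget : cs.getD i ' ' = cs[i] := List.getD_eq_getElem cs ' ' h
      have hdrop : cs.drop i = cs[i] :: cs.drop (i + 1) := List.drop_eq_getElem_cons h
      rw [aScanW, dif_pos (show i < cs.length ∧ c ≠ '#' from ⟨h, hc⟩), hget]
      by_cases hci : cs[i] = '#'
      · have htk : takeRun false (cs.drop i) = (0, cs.drop i) := by
          rw [hdrop]; simp [takeRun, hci]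
        refine ⟨'#', ?_, ?_⟩
        · rw [aScanW, dif_neg (by simp [hci])]
          rw [htk]
          have hne : cs.drop i ≠ [] := by rw [hdrop]; exact List.cons_ne_nil _ _
          simp only [if_neg hne]
          simp [hci]
        · rw [htk]
          have hne : cs.drop i ≠ [] := by rw [hdrop]; exact List.cons_ne_nil _ _
          exact ⟨fun _ => hne, fun _ => rfl⟩
      · obtain ⟨c2, heq, hiff⟩ := ih (i + 1) cs[i] (by omega) (by omega) hci
        have htk : takeRun false (cs.drop i) =
            ((takeRun false (cs.drop (i + 1))).1 + 1, (takeRun false (cs.drop (i + 1))).2) := by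
          rw [hdrop]; simp [takeRun, hci]
        refine ⟨c2, ?_, ?_⟩
        · rw [heq, htk]
          simp; omega
        · rw [htk]; exact hiff
    · have : i = cs.length := by omega
      subst this
      have hdrop : cs.drop cs.length = [] := by simp
      refine ⟨c, ?_, ?_⟩
      · rw [aScanW]; simp [hdrop, takeRun]
      · simp [hdrop, takeRun, hc]

theorem aRow_step (cs : List Char) (i : Nat) (r : Int)
    (acc : List ((Int × Int) × (Int × Int))) (h : i < cs.length) :
    aRowW cs i r acc =
      aRowW cs (aScanW cs (aSkipW cs i (cs.getD i ' ')).1 (aSkipW cs i (cs.getD i ' ')).2).1 r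
        (if (if (aScanW cs (aSkipW cs i (cs.getD i ' ')).1 (aSkipW cs i (cs.getD i ' ')).2).1 ≤ cs.length ∧
                (aScanW cs (aSkipW cs i (cs.getD i ' ')).1 (aSkipW cs i (cs.getD i ' ')).2).2 = '#' then
              ((aScanW cs (aSkipW cs i (cs.getD i ' ')).1 (aSkipW cs i (cs.getD i ' ')).2).1 : Int) - 2
            else ((aScanW cs (aSkipW cs i (cs.getD i ' ')).1 (aSkipW cs i (cs.getD i ' ')).2).1 : Int) - 1) -
              ((aSkipW cs i (cs.getD i ' ')).1 : Int) < 1 then acc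
         else acc ++ [((r, ((aSkipW cs i (cs.getD i ' ')).1 : Int)),
            (r, if (aScanW cs (aSkipW cs i (cs.getD i ' ')).1 (aSkipW cs i (cs.getD i ' ')).2).1 ≤ cs.length ∧
                  (aScanW cs (aSkipW cs i (cs.getD i ' ')).1 (aSkipW cs i (cs.getD i ' ')).2).2 = '#' then
                ((aScanW cs (aSkipW cs i (cs.getD i ' ')).1 (aSkipW cs i (cs.getD i ' ')).2).1 : Int) - 2
              else ((aScanW cs (aSkipW cs i (cs.getD i ' ')).1 (aSkipW cs i (cs.getD i ' ')).2).1 : Int) - 1))]) := by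
  rw [aRowW, dif_pos h]

theorem aRow_eq (cs : List Char) (r : Int) :
    ∀ n i acc, cs.length - i ≤ n → i ≤ cs.length →
      aRowW cs i r acc = acc ++ bRowW r i (cs.drop i) := by
  intro n
  induction n with
  | zero =>
    intro i acc hle hi
    have : i = cs.length := by omega
    subst this
    rw [aRowW]
    simp [bRow_nil]
  | succ n ih =>
    intro i acc hle hi
    by_cases h : i < cs.length
    · have hskip := aSkip_eq cs (cs.length - i) i h le_rfl
      have hdrop : cs.drop i = cs[i] :: cs.drop (i + 1) := List.drop_eq_getElem_cons h
      have hsub := takeRun_snd_drop true (cs.drop i)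
      have hlen := takeRun_len true (cs.drop i)
      have hBskip := bRow_skipHash r (cs.drop i) i
      rw [aRow_step cs i r acc h, hskip]
      cases hrem : (takeRun true (cs.drop i)).2 with
      | nil =>
        -- the whole suffix is hashes: A appends nothing and stops; the runs view is all-hash
        rw [hrem] at hskip hsub hlen hBskip
        have hklen : (takeRun true (cs.drop i)).1 = cs.length - i := by
          simp at hlen; omega
        have hiklen : i + (takeRun true (cs.drop i)).1 = cs.length := by omega
        simp only [List.headD_nil]
        rw [aScanW, dif_neg (by simp)]
        simp only
        rw [if_pos (show ((if i + (takeRun true (List.drop i cs)).1 ≤ cs.length ∧ True then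
              ((i + (takeRun true (List.drop i cs)).1 : Nat) : Int) - 2
            else ((i + (takeRun true (List.drop i cs)).1 : Nat) : Int) - 1) -
              ((i + (takeRun true (List.drop i cs)).1 : Nat) : Int) < 1) by
          rw [if_pos ⟨by omega, trivial⟩]; omega)]
        rw [aRowW, dif_neg (by omega), hBskip, bRow_nil]
        simp
      | cons c1 t1 =>
        have hc1 : (c1 == '#') = false := by
          simpa using takeRun_snd_head true (cs.drop i) c1 t1 hrem
        have hc1' : c1 ≠ '#' := by simpa using hc1
        rw [hrem] at hsub hBskip
        simp only [List.headD_cons]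
        have hdd : cs.drop (i + (takeRun true (cs.drop i)).1) = c1 :: t1 := by
          rw [hsub, List.drop_drop]
        have hi1 : i + (takeRun true (cs.drop i)).1 < cs.length := by
          by_contra hcon
          rw [List.drop_eq_nil_iff.2 (by omega)] at hdd
          simp at hdd
        obtain ⟨c2, heq, hiff⟩ :=
          aScan_eq cs cs.length (i + (takeRun true (cs.drop i)).1) c1 (by omega) (by omega) hc1'
        have hlen2 := takeRun_len false (cs.drop (i + (takeRun true (cs.drop i)).1))
        have hsub2 := takeRun_snd_drop false (cs.drop (i + (takeRun true (cs.drop i)).1))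
        have hm1 : 1 ≤ (takeRun false (cs.drop (i + (takeRun true (cs.drop i)).1))).1 := by
          rw [hdd]
          simp [takeRun, hc1]
        rw [heq]
        simp only
        -- runs side: skip the hash group, then the non-hash group of length m
        rw [hBskip, bRow_cons (r := r)]
        rw [← hdd]
        cases hremT : (takeRun false (cs.drop (i + (takeRun true (cs.drop i)).1))).2 with
        | nil =>
          rw [hremT] at heq hiff hlen2 hsub2
          have hc2 : ¬ c2 = '#' := by simpa using hiff
          have hKM : i + (takeRun true (List.drop i cs)).1 +
              (takeRun false (List.drop (i + (takeRun true (List.drop i cs)).1) cs)).1 = cs.length := by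
            rw [List.length_drop] at hlen2
            simp only [List.length_nil, Nat.add_zero] at hlen2
            omega
          rw [hc1, hremT, bRow_nil]
          rw [aRowW, dif_neg (by simp; omega)]
          simp only [hc2, and_false, if_false, if_true, true_and, Nat.add_zero]
          split_ifs with h1 h2
          · exfalso; omega
          · simp
          · simp only [List.append_nil]
            congr 2
          · exfalso; omega
        | cons ch t2 =>
          have hch : ch = '#' := by
            have := takeRun_snd_head false
              (cs.drop (i + (takeRun true (cs.drop i)).1)) ch t2 hremT
            simpa using this
          subst hch
          have hc2' : c2 = '#' := hiff.2 (by simp [hremT])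
          subst hc2'
          have hdd2 : cs.drop (i + (takeRun true (cs.drop i)).1 +
              (takeRun false (cs.drop (i + (takeRun true (cs.drop i)).1))).1) = '#' :: t2 := by
            rw [← hremT, hsub2, List.drop_drop]
          have hlt : i + (takeRun true (cs.drop i)).1 +
              (takeRun false (cs.drop (i + (takeRun true (cs.drop i)).1))).1 < cs.length := by
            by_contra hcon
            rw [List.drop_eq_nil_iff.2 (by omega)] at hdd2
            simp at hdd2
          have ht2 : cs.drop (i + (takeRun true (cs.drop i)).1 +
              (takeRun false (cs.drop (i + (takeRun true (cs.drop i)).1))).1 + 1) = t2 := by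
            rw [← List.drop_drop, hdd2]
            rfl
          simp only [show ('#' :: t2 = ([] : List Char)) = False from by simp, if_false]
          rw [hc1, hremT]
          rw [ih _ _ (by omega) (by omega), ht2, bRow_cons_hash]
          simp only [and_true, true_and]
          rw [if_pos (show i + (takeRun true (cs.drop i)).1 +
              (takeRun false (cs.drop (i + (takeRun true (cs.drop i)).1))).1 + 1 ≤ cs.length by
            omega)]
          split_ifs with h1 h2
          · exfalso; omega
          · simp
          · simp only [List.append_assoc, List.cons_append, List.nil_append]
            congr 4
            push_cast
            omega
          · exfalso; omega
    · have : i = cs.length := by omega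
      subst this
      rw [aRowW]
      simp [bRow_nil]

-- fuel is irrelevant once it is large enough: the A port equals the proof-side loops
theorem aSkip_bridge (cs : List Char) :
    ∀ fuel i c, cs.length - i ≤ fuel → aSkip cs fuel i c = aSkipW cs i c := by
  intro fuel
  induction fuel with
  | zero =>
    intro i c hle
    rw [aSkipW, dif_neg (by rintro ⟨h1, -⟩; omega)]
    rfl
  | succ fuel ih =>
    intro i c hle
    rw [aSkipW]
    show (if i < cs.length ∧ c = '#' then _ else _) = _
    by_cases hcond : i < cs.length ∧ c = '#'
    · rw [if_pos hcond, dif_pos hcond]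
      by_cases hend : i + 1 = cs.length
      · rw [if_pos hend, if_pos hend]
      · rw [if_neg hend, if_neg hend]
        exact ih (i + 1) _ (by omega)
    · rw [if_neg hcond, dif_neg hcond]

theorem aScan_bridge (cs : List Char) :
    ∀ fuel i c, cs.length - i ≤ fuel → aScan cs fuel i c = aScanW cs i c := by
  intro fuel
  induction fuel with
  | zero =>
    intro i c hle
    rw [aScanW, dif_neg (by rintro ⟨h1, -⟩; omega)]
    rfl
  | succ fuel ih =>
    intro i c hle
    rw [aScanW]
    show (if i < cs.length ∧ c ≠ '#' then _ else _) = _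
    by_cases hcond : i < cs.length ∧ c ≠ '#'
    · rw [if_pos hcond, dif_pos hcond]
      exact ih (i + 1) _ (by omega)
    · rw [if_neg hcond, dif_neg hcond]

theorem aRow_bridge (cs : List Char) (r : Int) :
    ∀ fuel i acc, cs.length - i < fuel → aRow cs fuel i r acc = aRowW cs i r acc := by
  intro fuel
  induction fuel with
  | zero => intro i acc hle; omega
  | succ fuel ih =>
    intro i acc hle
    by_cases h : i < cs.length
    · rw [show aRow cs (fuel + 1) i r acc =
          (let c := cs.getD i ' ';
           let p := aSkip cs cs.length i c;
           let q := aScan cs (cs.length + 1) p.1 p.2;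
           let wend : Int := if q.1 ≤ cs.length ∧ q.2 = '#' then (q.1 : Int) - 2 else (q.1 : Int) - 1;
           let acc' := if wend - (p.1 : Int) < 1 then acc
                       else acc ++ [((r, (p.1 : Int)), (r, wend))];
           aRow cs fuel q.1 r acc') from by rw [aRow, if_pos h]]
      simp only [aSkip_bridge cs cs.length i (cs.getD i ' ') (by omega),
        aScan_bridge cs (cs.length + 1) (aSkipW cs i (cs.getD i ' ')).1
          (aSkipW cs i (cs.getD i ' ')).2 (by omega)]
      rw [aRow_step cs i r acc h]
      have hstrict : i + 1 ≤ (aScanW cs (aSkipW cs i (cs.getD i ' ')).1 (aSkipW cs i (cs.getD i ' ')).2).1 := by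
        by_cases hc : cs.getD i ' ' = '#'
        · have h1 := aSkip_fst_pos cs i (cs.getD i ' ') h hc
          have h2 := aScan_fst_ge cs (aSkipW cs i (cs.getD i ' ')).1 (aSkipW cs i (cs.getD i ' ')).2
          omega
        · rw [aSkip_of_ne cs i _ hc]
          exact aScan_fst_pos cs i _ h hc
      exact ih _ _ (by omega)
    · rw [show aRow cs (fuel + 1) i r acc = acc from by rw [aRow, if_neg h], aRowW, dif_neg h]

-- ===== lemmas for the B side: boundaries and pairing =====

-- the '#' positions of cs, as absolute Int indices starting at i
def hIdx (i : Int) : List Char → List Int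
  | [] => []
  | c :: t => (if c = '#' then [i] else []) ++ hIdx (i + 1) t

-- the inner `for p, q in zip(bounds, bounds[1:])` loop, as a recursion on the tail
def bPairs (r : Int) (p : Int) : List Int → List ((Int × Int) × (Int × Int))
  | [] => []
  | q :: rest => (if 3 ≤ q - p then [((r, p + 1), (r, q - 1))] else []) ++ bPairs r q rest

theorem bPairs_cons (r p q : Int) (rest : List Int) :
    bPairs r p (q :: rest) =
      (if 3 ≤ q - p then [((r, p + 1), (r, q - 1))] else []) ++ bPairs r q rest := rfl

theorem hIdx_cons (i : Int) (c : Char) (t : List Char) :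
    hIdx i (c :: t) = (if c = '#' then [i] else []) ++ hIdx (i + 1) t := rfl

theorem enum_filter_eq_hIdx (cs : List Char) :
    ∀ i : Int, ((PySem.List.enumerate cs i).filter (fun p => p.2 == '#')).map (fun p => p.1) =
      hIdx i cs := by
  induction cs with
  | nil => intro i; simp [PySem.List.enumerate_nil, hIdx]
  | cons c t ih =>
    intro i
    rw [PySem.List.enumerate_cons]
    by_cases h : c = '#' <;> simp [hIdx, h, ih]

theorem zip_foldl_eq_bPairs (r : Int) (f : List ((Int × Int) × (Int × Int)) → Int × Int →
      List ((Int × Int) × (Int × Int)))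
    (hf : ∀ acc pq, f acc pq =
      if 3 ≤ pq.2 - pq.1 then acc ++ [((r, pq.1 + 1), (r, pq.2 - 1))] else acc) :
    ∀ (l : List Int) (p : Int) (acc : List ((Int × Int) × (Int × Int))),
      ((p :: l).zip l).foldl f acc = acc ++ bPairs r p l := by
  intro l
  induction l with
  | nil => intro p acc; simp [bPairs]
  | cons q rest ih =>
    intro p acc
    rw [show (p :: q :: rest).zip (q :: rest) = (p, q) :: ((q :: rest).zip rest) from rfl]
    rw [List.foldl_cons, ih, hf]
    simp only [bPairs]
    split_ifs <;> simp

theorem hIdx_skip_nonhash (l : List Char) :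
    ∀ i : Int, hIdx i l = hIdx (i + (takeRun false l).1) (takeRun false l).2 := by
  induction l with
  | nil => intro i; simp [takeRun]
  | cons c t ih =>
    intro i
    by_cases h : c = '#'
    · have : takeRun false (c :: t) = (0, c :: t) := by simp [takeRun, h]
      rw [this]; simp
    · have : takeRun false (c :: t) = ((takeRun false t).1 + 1, (takeRun false t).2) := by
        simp [takeRun, h]
      rw [this]
      simp only [hIdx, h, if_neg, List.nil_append, ite_false]
      rw [ih (i + 1)]
      congr 1
      push_cast
      ring

-- the boundary-pairing view equals the runs view
theorem bPairs_eq_bRowW (r : Int) :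
    ∀ n (cs : List Char) (i : Nat), cs.length ≤ n →
      bPairs r ((i : Int) - 1) (hIdx (i : Int) cs ++ [(i : Int) + cs.length]) = bRowW r i cs := by
  intro n
  induction n with
  | zero =>
    intro cs i hle
    have : cs = [] := List.length_eq_zero_iff.1 (by omega)
    subst this
    simp [hIdx, bPairs, bRow_nil]
  | succ n ih =>
    intro cs i hle
    cases cs with
    | nil => simp [hIdx, bPairs, bRow_nil]
    | cons c t =>
      by_cases h : c = '#'
      · subst h
        simp only [hIdx_cons, eq_self_iff_true, if_true, ite_true, List.singleton_append, List.cons_append]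
        rw [bPairs_cons]
        rw [if_neg (by omega)]
        rw [bRow_cons_hash]
        have h1 : hIdx ((i : Int) + 1) t = hIdx ((i + 1 : Nat) : Int) t := by push_cast; ring_nf
        have h2 : (i : Int) + (('#' :: t).length : Int) = ((i + 1 : Nat) : Int) + (t.length : Int) := by
          push_cast; simp; ring
        rw [h1, h2, List.nil_append]
        have h3 : (i : Int) = ((i + 1 : Nat) : Int) - 1 := by push_cast; ring
        rw [h3]
        exact ih t (i + 1) (by simpa using Nat.lt_succ_iff.mp (by simpa using hle))
      · have hcb : (c == '#') = false := by simpa using h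
        have htk : takeRun false (c :: t) = ((takeRun false t).1 + 1, (takeRun false t).2) := by
          simp [takeRun, hcb]
        set m : Nat := (takeRun false t).1 + 1 with hm
        set rest : List Char := (takeRun false t).2 with hrest
        have hskip : hIdx (i : Int) (c :: t) = hIdx ((i : Int) + (m : Int)) rest := by
          have := hIdx_skip_nonhash (c :: t) (i : Int)
          rw [htk] at this
          simpa using this
        have hlen : m + rest.length = (c :: t).length := by
          have := takeRun_len false (c :: t)
          rw [htk] at this
          simpa using this
        have hbtk : takeRun (c == '#') (c :: t) = (m, rest) := by rw [hcb, htk]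
        -- bRowW side
        rw [bRow_cons, hbtk]
        simp only [hcb]
        -- hIdx side
        rw [hskip]
        cases hre : rest with
        | nil =>
          rw [hre] at hlen
          simp only [List.length_nil, Nat.add_zero, List.length_cons] at hlen
          simp only [hre, hIdx, List.nil_append, bPairs_cons, bPairs, List.append_nil,
            bRow_nil, true_and, List.length_cons]
          by_cases h2 : 2 ≤ m
          · rw [if_pos (by push_cast; omega), if_pos h2]
            have e0 : (i : Int) + ((t.length + 1 : Nat) : Int) = (i : Int) + (m : Int) := by
              push_cast; omega
            have e1 : (i : Int) - 1 + 1 = (i : Int) := by ring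
            rw [e0, e1]
          · rw [if_neg (by push_cast; omega), if_neg h2]
        | cons ch t2 =>
          have hch : ch = '#' := by
            have h9 : (takeRun false (c :: t)).2 = ch :: t2 := by rw [htk]; exact hre
            simpa using takeRun_snd_head false (c :: t) ch t2 h9
          subst hch
          have hlen2 : t.length = m + t2.length := by
            rw [hre] at hlen; simp at hlen; omega
          simp only [hre, hIdx_cons, eq_self_iff_true, if_true, ite_true,
            List.singleton_append, List.cons_append, List.nil_append]
          rw [bPairs_cons, bRow_cons_hash]
          have hIH := ih t2 (i + m + 1) (by simp at hle ⊢; omega)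
          have e1 : hIdx ((i : Int) + (m : Nat) + 1) t2 = hIdx (((i + m + 1 : Nat)) : Int) t2 := by
            push_cast; ring_nf
          have e2 : (i : Int) + ((c :: t).length : Int) =
              ((i + m + 1 : Nat) : Int) + (t2.length : Int) := by
            simp only [List.length_cons, hlen2]; push_cast; ring
          rw [e1, e2]
          rw [show ((i : Int) + (m : Nat)) = ((i + m + 1 : Nat) : Int) - 1 from by push_cast; ring,
            hIH]
          by_cases hm2 : 2 ≤ m
          · rw [if_pos (by push_cast; omega), if_pos (by exact ⟨trivial, hm2⟩)]
            congr 3 <;> push_cast <;> ring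
          · rw [if_neg (by push_cast; omega), if_neg (by simp; omega)]

-- per-row: the B port's inner computation equals the runs view
theorem bPort_row_eq (r : Int) (cs : List Char) (acc : List ((Int × Int) × (Int × Int))) :
    (([-1] ++ ((PySem.List.enumerate cs 0).filter (fun p : Int × Char => p.2 == '#')).map
          (fun p : Int × Char => p.1)
        ++ [(cs.length : Int)]).zip
      (([-1] ++ ((PySem.List.enumerate cs 0).filter (fun p : Int × Char => p.2 == '#')).map
          (fun p : Int × Char => p.1)
        ++ [(cs.length : Int)]).drop 1)).foldl
      (fun (words : List ((Int × Int) × (Int × Int))) (pq : Int × Int) =>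
        if 3 ≤ pq.2 - pq.1 then words ++ [((r, pq.1 + 1), (r, pq.2 - 1))] else words) acc
    = acc ++ bRowW r 0 cs := by
  rw [enum_filter_eq_hIdx cs 0]
  have hb : [-1] ++ hIdx 0 cs ++ [(cs.length : Int)] = (-1) :: (hIdx 0 cs ++ [(cs.length : Int)]) := by
    simp
  rw [hb]
  rw [show ((-1) :: (hIdx 0 cs ++ [(cs.length : Int)])).drop 1 = hIdx 0 cs ++ [(cs.length : Int)] from rfl]
  rw [zip_foldl_eq_bPairs r _ (fun acc pq => rfl) (hIdx 0 cs ++ [(cs.length : Int)]) (-1) acc]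
  congr 1
  have := bPairs_eq_bRowW r cs.length cs 0 le_rfl
  simpa using this

-- runs view of the whole grid
def bRowsW (r : Int) (grid : List String) : List ((Int × Int) × (Int × Int)) :=
  match grid with
  | [] => []
  | row :: rest => bRowW r 0 row.toList ++ bRowsW (r + 1) rest

theorem alt_eq_bRowsW :
    ∀ (grid : List String) (r : Int) (acc : List ((Int × Int) × (Int × Int))),
      (PySem.List.enumerate grid r).foldl (fun words rp =>
        let row := rp.2.toList
        let bounds : List Int :=
          [-1] ++ ((PySem.List.enumerate row 0).filter (fun p => p.2 == '#')).map (fun p => p.1)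
            ++ [(row.length : Int)]
        (bounds.zip (bounds.drop 1)).foldl
          (fun words pq =>
            if 3 ≤ pq.2 - pq.1 then words ++ [((rp.1, pq.1 + 1), (rp.1, pq.2 - 1))] else words)
          words) acc
      = acc ++ bRowsW r grid := by
  intro grid
  induction grid with
  | nil => intro r acc; simp [PySem.List.enumerate_nil, bRowsW]
  | cons row rest ih =>
    intro r acc
    rw [PySem.List.enumerate_cons, List.foldl_cons]
    simp only
    rw [bPort_row_eq r row.toList acc, ih, bRowsW]
    simp

theorem aRows_eq : ∀ (grid : List String) (r : Int) (acc : List ((Int × Int) × (Int × Int))),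
    aRows grid r acc = acc ++ bRowsW r grid := by
  intro grid
  induction grid with
  | nil => intro r acc; simp [aRows, bRowsW]
  | cons row rest ih =>
    intro r acc
    rw [aRows, bRowsW, ih]
    rw [aRow_bridge row.toList r _ 0 acc (by omega)]
    rw [aRow_eq row.toList r row.toList.length 0 acc (by omega) (by omega)]
    simp

-- ===== VERDICT (by name: the statement is the Claim_ definition above) =====
theorem get_horizontal_words_spec : Claim_equal_get_horizontal_words := by
  intro grid _
  unfold Spec_get_horizontal_words get_horizontal_words get_horizontal_words_alt
  rw [aRows_eq, alt_eq_bRowsW]
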